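-- pv_equiv track=rewrite | github.com/roeisharon/C-Python-symNMF | kmeans.py | is_valid_int
-- ===== SOURCE A (Python) =====
-- def is_valid_int(value):
--     """
--     Check if the given string represents a valid integer.
--     Accepts formats like "3", "3.0", "7.000" (but not "3.1").
--
--     Args:
--         value (str): String to validate.
--
--     Returns:
--         bool: True if the string represents a valid integer, False otherwise.
--     """
--     for i in range(len(value)):
--         if not value[i].isdigit() and value[i] != ".":
--             return False
--         elif value[i] == ".":
--             if i == len(value) - 1:
--                 return False
--             i += 1
--             while i < len(value):
--                 if value[i] != '0':
--                     return False
--                 i += 1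
--             break
--     return True
-- ===== SOURCE B (Python) =====
-- def is_valid_int(value):
--     if '.' in value:
--         head, _, tail = value.partition('.')
--         return (head == '' or head.isdigit()) and tail != '' and all(c == '0' for c in tail)
--     return value == '' or value.isdigit()
-- ===== Notes on version B (the rewrite author's own statement) =====
-- stated objective: simpler
-- what changed: Replaces A's indexed char-scan with a sentinel inner while-loop and break by a single partition at the first dot plus three substring checks (head empty-or-digits, tail nonempty and all zeros).
import Mathlib
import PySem

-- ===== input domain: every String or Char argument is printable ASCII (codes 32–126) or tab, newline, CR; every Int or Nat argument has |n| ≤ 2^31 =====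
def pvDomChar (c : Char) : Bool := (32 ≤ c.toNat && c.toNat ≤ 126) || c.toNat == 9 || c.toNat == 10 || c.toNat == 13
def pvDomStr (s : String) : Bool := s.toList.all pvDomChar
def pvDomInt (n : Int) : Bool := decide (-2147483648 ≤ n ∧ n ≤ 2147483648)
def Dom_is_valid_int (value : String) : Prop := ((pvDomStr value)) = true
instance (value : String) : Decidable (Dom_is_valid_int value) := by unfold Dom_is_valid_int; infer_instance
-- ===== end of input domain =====

-- B validates "integer string, possibly with a trailing '.000…' part" by partitioning at the
-- first dot instead of A's indexed scan with an inner while and break: simpler decomposition.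

-- ===== PORT A =====
-- A's for-loop over indices: at each char, non-digit non-dot → False; at the first dot,
-- dot-as-last-char → False, else the inner while checks every remaining char is '0'
-- (return False otherwise) and then breaks out, returning True.
def isValidIntLoopA : List Char → Bool
  | [] => true
  | c :: rest =>
    if !(PySem.Chars.isdigit c) && c ≠ '.' then false
    else if c = '.' then
      if rest.isEmpty then false          -- i == len(value) - 1
      else rest.all (fun d => d == '0')   -- inner while over the remaining chars, then break
    else isValidIntLoopA rest

def is_valid_int (value : String) : Bool := isValidIntLoopA value.toList

-- ===== PORT B =====
-- B: partition at the first '.' (takeWhile/dropWhile.tail) and three substring checks.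
def is_valid_int_alt (value : String) : Bool :=
  let cs := value.toList
  if '.' ∈ cs then
    let head := cs.takeWhile (· ≠ '.')
    let tail := (cs.dropWhile (· ≠ '.')).tail
    (head.isEmpty || PySem.Chars.strIsdigit head) && (!tail.isEmpty && tail.all (fun c => c == '0'))
  else cs.isEmpty || PySem.Chars.strIsdigit cs

-- ===== PRECONDITION & SPEC =====
def Spec_is_valid_int (value : String) (out : Bool) : Prop := out = is_valid_int_alt value
instance (value : String) (out : Bool) : Decidable (Spec_is_valid_int value out) := by unfold Spec_is_valid_int; infer_instance

-- ===== CLAIM (what is proved, stated in full; the proofs are below) =====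
def Claim_equal_is_valid_int : Prop := ∀ (value : String), Dom_is_valid_int value → Spec_is_valid_int value (is_valid_int value)

-- ===== LEMMAS AND PROOFS =====

-- B's body, stated on the character list (what is_valid_int_alt computes on value.toList).
def altCore (cs : List Char) : Bool :=
  if '.' ∈ cs then
    (((cs.takeWhile (· ≠ '.')).isEmpty || PySem.Chars.strIsdigit (cs.takeWhile (· ≠ '.'))) &&
      (!((cs.dropWhile (· ≠ '.')).tail).isEmpty && ((cs.dropWhile (· ≠ '.')).tail).all (fun c => c == '0')))
  else cs.isEmpty || PySem.Chars.strIsdigit cs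

lemma altCore_eq (value : String) : is_valid_int_alt value = altCore value.toList := rfl

lemma emptyOr_strIsdigit (l : List Char) :
    (l.isEmpty || PySem.Chars.strIsdigit l) = l.all PySem.Chars.isdigit := by
  cases l <;> simp [PySem.Chars.strIsdigit]

lemma loopA_eq_altCore : ∀ cs : List Char, isValidIntLoopA cs = altCore cs := by
  intro cs
  induction cs with
  | nil => rfl
  | cons c rest ih =>
    by_cases hdot : c = '.'
    · subst hdot
      simp [isValidIntLoopA, altCore, List.takeWhile, List.dropWhile, List.isEmpty_iff]
      cases rest <;> simp
    · by_cases hdig : PySem.Chars.isdigit c = true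
      · -- digit head: A recurses; B's partition keeps c in head (or no dot at all)
        rw [show isValidIntLoopA (c :: rest) = isValidIntLoopA rest by
              simp [isValidIntLoopA, hdot, hdig]]
        rw [ih]
        have htw : (c :: rest).takeWhile (· ≠ '.') = c :: rest.takeWhile (· ≠ '.') := by
          simp [hdot]
        have hdw : (c :: rest).dropWhile (· ≠ '.') = rest.dropWhile (· ≠ '.') := by
          simp [hdot]
        simp only [altCore, List.mem_cons, htw, hdw, emptyOr_strIsdigit]
        by_cases hmem : '.' ∈ rest
        · simp [hmem, Ne.symm hdot, hdig]
        · simp [hmem, Ne.symm hdot, hdig]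
      · -- non-digit non-dot head: A returns false; B's head check fails
        rw [show isValidIntLoopA (c :: rest) = false by
              simp [isValidIntLoopA, hdot, hdig]]
        simp only [altCore, List.takeWhile, List.dropWhile, PySem.Chars.strIsdigit]
        by_cases hmem : '.' ∈ (c :: rest) <;>
          simp_all [Ne.symm hdot]

-- ===== VERDICT (by name: the statement is the Claim_ definition above) =====
theorem is_valid_int_spec : Claim_equal_is_valid_int := by
  intro value _
  show is_valid_int value = is_valid_int_alt value
  rw [altCore_eq]
  exact loopA_eq_altCore value.toList
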